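-- pv_equiv track=rewrite | github.com/bonzo81/netbox-toolkit-plugin | netbox_toolkit_plugin/services/encryption_service.py | validate_token_format
-- ===== SOURCE A (Python) =====
-- def validate_token_format(token: str) -> bool:
--     """
--     Validate that a token has the expected format.
--
--     Args:
--         token: Token to validate
--
--     Returns:
--         True if token format is valid
--     """
--     if not token or not isinstance(token, str):
--         return False
--
--     # Check length (URL-safe base64 tokens are typically 86 chars for 64 bytes)
--     if len(token) < 40 or len(token) > 128:
--         return False
--
--     # Check character set (URL-safe base64)
--     allowed_chars = set(
--         "ABCDEFGHIJKLMNOPQRSTUVWXYZabcdefghijklmnopqrstuvwxyz0123456789-_"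
--     )
--     return all(c in allowed_chars for c in token)
-- ===== SOURCE B (Python) =====
-- import re
--
-- _TOKEN_RE = re.compile(r'[A-Za-z0-9_-]{40,128}')
--
--
-- def validate_token_format(token: str) -> bool:
--     if not token or not isinstance(token, str):
--         return False
--     return _TOKEN_RE.fullmatch(token) is not None
-- ===== Notes on version B (the rewrite author's own statement) =====
-- stated objective: idiomatic
-- what changed: Replaces the per-character set-membership loop and explicit length bounds with a single precompiled regex fullmatch ([A-Za-z0-9_-]{40,128}) after the falsy/type guard.
import Mathlib
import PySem

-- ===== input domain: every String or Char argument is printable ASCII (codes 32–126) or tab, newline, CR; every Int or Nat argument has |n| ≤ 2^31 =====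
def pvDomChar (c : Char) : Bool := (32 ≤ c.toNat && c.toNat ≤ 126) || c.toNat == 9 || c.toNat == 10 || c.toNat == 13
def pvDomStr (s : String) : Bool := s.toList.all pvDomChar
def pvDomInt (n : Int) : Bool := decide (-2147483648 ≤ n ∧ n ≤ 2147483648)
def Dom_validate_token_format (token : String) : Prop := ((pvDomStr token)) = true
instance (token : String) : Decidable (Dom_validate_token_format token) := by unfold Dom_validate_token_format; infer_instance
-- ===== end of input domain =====

-- B replaces A's per-character set-membership loop and separate length checks by one
-- precompiled regex fullmatch ([A-Za-z0-9_-]{40,128}) after the falsy guard (more idiomatic).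

-- ===== PORT A =====
def validate_token_format (token : String) : Bool :=
  -- if not token or not isinstance(token, str): return False  (isinstance is always true for a str)
  if token.toList = [] then false
  -- if len(token) < 40 or len(token) > 128: return False
  else if token.toList.length < 40 || token.toList.length > 128 then false
  else
    -- allowed_chars = set("ABC…-_"); all(c in allowed_chars for c in token)
    let allowed : PySem.Set Char :=
      PySem.Set.ofList
        "ABCDEFGHIJKLMNOPQRSTUVWXYZabcdefghijklmnopqrstuvwxyz0123456789-_".toList
    token.toList.all (fun c => PySem.Set.contains allowed c)

-- ===== PORT B =====
-- one character of the regex class [A-Za-z0-9_-]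
def tokenClassChar (c : Char) : Bool :=
  ('A' ≤ c && c ≤ 'Z') || ('a' ≤ c && c ≤ 'z') || ('0' ≤ c && c ≤ '9') || c == '_' || c == '-'

-- re.fullmatch(r'[A-Za-z0-9_-]{40,128}', s) is not None — the exact meaning of this regex
def tokenFullmatch (s : List Char) : Bool :=
  40 ≤ s.length && s.length ≤ 128 && s.all tokenClassChar

def validate_token_format_alt (token : String) : Bool :=
  if token.toList = [] then false
  else tokenFullmatch token.toList

-- ===== PRECONDITION & SPEC =====
def Spec_validate_token_format (token : String) (out : Bool) : Prop := out = validate_token_format_alt token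
instance (token : String) (out : Bool) : Decidable (Spec_validate_token_format token out) := by unfold Spec_validate_token_format; infer_instance

-- ===== CLAIM (what is proved, stated in full; the proofs are below) =====
def Claim_equal_validate_token_format : Prop := ∀ (token : String), Dom_validate_token_format token → Spec_validate_token_format token (validate_token_format token)

-- ===== LEMMAS AND PROOFS =====

set_option maxRecDepth 4096 in
lemma contains_allowed_eq_tokenClassChar (c : Char) :
    PySem.Set.contains
      (PySem.Set.ofList
        "ABCDEFGHIJKLMNOPQRSTUVWXYZabcdefghijklmnopqrstuvwxyz0123456789-_".toList) c
      = tokenClassChar c := by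
  have hs :
      PySem.Set.ofList
        "ABCDEFGHIJKLMNOPQRSTUVWXYZabcdefghijklmnopqrstuvwxyz0123456789-_".toList
      = "ABCDEFGHIJKLMNOPQRSTUVWXYZabcdefghijklmnopqrstuvwxyz0123456789-_".toList := by
    decide
  rw [hs, Bool.eq_iff_iff]
  constructor
  · intro h
    have hc := (PySem.Set.contains_iff _ _).mp h
    have hall :
        ("ABCDEFGHIJKLMNOPQRSTUVWXYZabcdefghijklmnopqrstuvwxyz0123456789-_".toList).all
          tokenClassChar = true := by decide
    exact List.all_eq_true.mp hall c hc
  · intro h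
    rw [PySem.Set.contains_iff]
    unfold tokenClassChar at h
    simp only [Bool.or_eq_true, Bool.and_eq_true, decide_eq_true_eq, beq_iff_eq] at h
    rcases h with ((((⟨a, b⟩ | ⟨a, b⟩) | ⟨a, b⟩) | rfl) | rfl)
    · have l1 : 65 ≤ c.toNat := a
      have l2 : c.toNat ≤ 90 := b
      interval_cases h : c.toNat <;> (rw [← Char.ofNat_toNat c, h]; decide)
    · have l1 : 97 ≤ c.toNat := a
      have l2 : c.toNat ≤ 122 := b
      interval_cases h : c.toNat <;> (rw [← Char.ofNat_toNat c, h]; decide)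
    · have l1 : 48 ≤ c.toNat := a
      have l2 : c.toNat ≤ 57 := b
      interval_cases h : c.toNat <;> (rw [← Char.ofNat_toNat c, h]; decide)
    · decide
    · decide

-- ===== VERDICT (by name: the statement is the Claim_ definition above) =====
theorem validate_token_format_spec : Claim_equal_validate_token_format := by
  intro token _
  unfold Spec_validate_token_format validate_token_format validate_token_format_alt tokenFullmatch
  by_cases h : token.toList = []
  · simp [h]
  · simp only [if_neg h, contains_allowed_eq_tokenClassChar]
    by_cases h1 : token.length < 40
    · have : ¬ 40 ≤ token.length := by omega
      simp [h1, this]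
    · by_cases h2 : token.length > 128
      · have : ¬ token.length ≤ 128 := by omega
        simp [h1, h2, this]
      · have e1 : 40 ≤ token.length := by omega
        have e2 : token.length ≤ 128 := by omega
        simp [h1, h2, e1, e2]
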